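-- pv_equiv track=rewrite | github.com/1hubert/learning-python | algorithms, coding problems/alphabetsoup.py | alphabetSoupB
-- ===== SOURCE A (Python) =====
-- def alphabetSoupB(string):
--     li = sorted(list(string))
--     lowerLi = sorted(list(string.lower()))
--     caps = []
--     newString = ''
--
--     for char in li:
--         if char.isupper():
--             caps.append(char)
--
--     for letter in lowerLi:
--         if caps.count(letter.upper()) != 0:
--             newString += letter.upper()
--             caps.pop(caps.index(letter.upper()))
--         else:
--             newString += letter
--
--     return newString
-- ===== SOURCE B (Python) =====
-- def alphabetSoupB(string):
--     total = {}
--     for c in string.lower():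
--         total[c] = total.get(c, 0) + 1
--     upper = {}
--     for c in string:
--         if c.isupper():
--             upper[c] = upper.get(c, 0) + 1
--     parts = []
--     for ch in sorted(total):
--         u = upper.get(ch.upper(), 0)
--         parts.append(ch.upper() * u + ch * (total[ch] - u))
--     return ''.join(parts)
-- ===== Notes on version B (the rewrite author's own statement) =====
-- stated objective: simpler
-- what changed: Replaces A's two fully sorted character lists and the per-character loop that repeatedly counts, searches (caps.index) and pops from the caps list with two frequency dictionaries built in one pass each and a single run-emitting loop over the sorted distinct letters.
import Mathlib
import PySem

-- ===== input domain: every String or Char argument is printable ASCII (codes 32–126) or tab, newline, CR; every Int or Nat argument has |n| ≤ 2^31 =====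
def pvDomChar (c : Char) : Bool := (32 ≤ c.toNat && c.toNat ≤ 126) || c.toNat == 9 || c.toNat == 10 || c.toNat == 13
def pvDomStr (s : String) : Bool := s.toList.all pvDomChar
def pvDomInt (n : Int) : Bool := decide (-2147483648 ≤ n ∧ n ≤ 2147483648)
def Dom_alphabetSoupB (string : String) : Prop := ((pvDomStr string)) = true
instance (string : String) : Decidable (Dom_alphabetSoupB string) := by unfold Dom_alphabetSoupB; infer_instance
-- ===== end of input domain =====

-- B replaces A's two sorted lists and its per-character counting/searching/popping loop by two
-- frequency dictionaries and one run-emitting pass over the sorted distinct letters (objective: simpler).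

-- ===== PORT A =====
-- loop body of A's second for-loop (named so the proofs below can speak about it)
def alphabetSoupBStep (st : List Char × List Char) (letter : Char) : List Char × List Char :=
  if PySem.List.count st.1 (PySem.Chars.upperChar letter) ≠ 0 then
    -- caps.pop(caps.index(u)) removes the FIRST occurrence of u, which the guard guarantees exists: List.erase
    (st.1.erase (PySem.Chars.upperChar letter), st.2 ++ [PySem.Chars.upperChar letter])
  else (st.1, st.2 ++ [letter])

def alphabetSoupB (string : String) : String :=
  let li := PySem.List.sorted string.toList (fun x => x) false
  let lowerLi := PySem.List.sorted (PySem.Str.lower string).toList (fun x => x) false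
  let caps := li.foldl (fun acc ch => if PySem.Chars.isupper ch then acc ++ [ch] else acc) ([] : List Char)
  let fin := lowerLi.foldl alphabetSoupBStep (caps, ([] : List Char))
  String.ofList fin.2

-- ===== PORT B =====
def alphabetSoupB_alt (string : String) : String :=
  let total := (PySem.Str.lower string).toList.foldl
      (fun d c => d.insert c (d.getD c 0 + 1)) (PySem.Dict.empty : PySem.Dict Char Int)
  let upper := string.toList.foldl
      (fun d c => if PySem.Chars.isupper c then d.insert c (d.getD c 0 + 1) else d)
      (PySem.Dict.empty : PySem.Dict Char Int)
  let parts := (PySem.List.sorted total.keys (fun x => x) false).foldl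
      (fun (acc : List String) ch =>
        let u := upper.getD (PySem.Chars.upperChar ch) 0
        -- total[ch]: ch is a key of total, so the lookup reads the stored count
        acc ++ [String.ofList (PySem.List.pyRepeat [PySem.Chars.upperChar ch] u
          ++ PySem.List.pyRepeat [ch] (total.getD ch 0 - u))])
      ([] : List String)
  PySem.Str.join "" parts

-- ===== PRECONDITION & SPEC =====
def Spec_alphabetSoupB (string : String) (out : String) : Prop := out = alphabetSoupB_alt string
instance (string : String) (out : String) : Decidable (Spec_alphabetSoupB string out) := by unfold Spec_alphabetSoupB; infer_instance

-- ===== CLAIM (what is proved, stated in full; the proofs are below) =====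
def Claim_equal_alphabetSoupB : Prop := ∀ (string : String), Dom_alphabetSoupB string → Spec_alphabetSoupB string (alphabetSoupB string)

-- ===== LEMMAS AND PROOFS =====

-- ---- generic Char facts about the ASCII case maps ----
theorem pvCharLe (a b : Char) : (a ≤ b) ↔ a.toNat ≤ b.toNat := by
  rw [Char.le_def]; exact UInt32.le_iff_toNat_le

theorem pvIsupper_iff (c : Char) : PySem.Chars.isupper c = true ↔ (65 ≤ c.toNat ∧ c.toNat ≤ 90) := by
  simp [PySem.Chars.isupper, pvCharLe]

theorem pvIslower_iff (c : Char) : PySem.Chars.islower c = true ↔ (97 ≤ c.toNat ∧ c.toNat ≤ 122) := by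
  simp [PySem.Chars.islower, pvCharLe]

theorem pvToNat_ofNat {n : Nat} (h : n < 55296) : (Char.ofNat n).toNat = n := by
  rw [Char.toNat_ofNat]; simp [Nat.isValidChar]; omega

theorem pvChar_ext {a b : Char} (h : a.toNat = b.toNat) : a = b := by
  have := congrArg Char.ofNat h
  rwa [Char.ofNat_toNat, Char.ofNat_toNat] at this

-- lowercasing never yields an uppercase letter
theorem pvLower_not_upper (x : Char) : PySem.Chars.isupper (PySem.Chars.lowerChar x) = false := by
  unfold PySem.Chars.lowerChar
  by_cases hu : PySem.Chars.isupper x = true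
  · rw [if_pos hu]
    have h1 := pvIsupper_iff x |>.mp hu
    rw [Bool.eq_false_iff]
    intro h
    rw [pvIsupper_iff, pvToNat_ofNat (by omega)] at h
    omega
  · rw [if_neg hu]
    simpa using hu

theorem pvUpper_toNat_of_lower {c : Char} (h : PySem.Chars.islower c = true) :
    (PySem.Chars.upperChar c).toNat = c.toNat - 32 := by
  have h1 := pvIslower_iff c |>.mp h
  unfold PySem.Chars.upperChar
  rw [if_pos h, pvToNat_ofNat (by omega)]

theorem pvIsupper_upper_of_lower {c : Char} (h : PySem.Chars.islower c = true) :
    PySem.Chars.isupper (PySem.Chars.upperChar c) = true := by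
  have h1 := pvIslower_iff c |>.mp h
  rw [pvIsupper_iff, pvUpper_toNat_of_lower h]
  omega

theorem pvLower_upper_of_lower {c : Char} (h : PySem.Chars.islower c = true) :
    PySem.Chars.lowerChar (PySem.Chars.upperChar c) = c := by
  have h1 := pvIslower_iff c |>.mp h
  have hU := pvUpper_toNat_of_lower h
  unfold PySem.Chars.lowerChar
  rw [if_pos (pvIsupper_upper_of_lower h)]
  apply pvChar_ext
  rw [pvToNat_ofNat (by omega)]
  omega

theorem pvUpper_of_not_lower {c : Char} (h : PySem.Chars.islower c = false) :
    PySem.Chars.upperChar c = c := by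
  unfold PySem.Chars.upperChar; rw [h]; simp

-- upperChar is injective on the non-uppercase characters
theorem pvUpper_inj {a b : Char} (ha : PySem.Chars.isupper a = false)
    (hb : PySem.Chars.isupper b = false)
    (h : PySem.Chars.upperChar a = PySem.Chars.upperChar b) : a = b := by
  by_cases la : PySem.Chars.islower a = true
  · by_cases lb : PySem.Chars.islower b = true
    · have h1 := pvUpper_toNat_of_lower la
      have h2 := pvUpper_toNat_of_lower lb
      have la' := pvIslower_iff a |>.mp la
      have lb' := pvIslower_iff b |>.mp lb
      have h3 := congrArg Char.toNat h
      rw [h1, h2] at h3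
      exact pvChar_ext (by omega)
    · exfalso
      have h1 := pvIsupper_upper_of_lower la
      rw [h, pvUpper_of_not_lower (by simpa using lb)] at h1
      rw [h1] at hb; exact Bool.noConfusion hb
  · by_cases lb : PySem.Chars.islower b = true
    · exfalso
      have h1 := pvIsupper_upper_of_lower lb
      rw [← h, pvUpper_of_not_lower (by simpa using la)] at h1
      rw [h1] at ha; exact Bool.noConfusion ha
    · rw [pvUpper_of_not_lower (by simpa using la),
          pvUpper_of_not_lower (by simpa using lb)] at h
      exact h

-- the two branch shapes of A's loop body
theorem pvStep_pos {caps acc : List Char} {c : Char}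
    (h : List.count (PySem.Chars.upperChar c) caps ≠ 0) :
    alphabetSoupBStep (caps, acc) c
      = (caps.erase (PySem.Chars.upperChar c), acc ++ [PySem.Chars.upperChar c]) := by
  unfold alphabetSoupBStep
  rw [if_pos (by simpa [PySem.List.count_eq] using h)]

theorem pvStep_zero {caps acc : List Char} {c : Char}
    (h : List.count (PySem.Chars.upperChar c) caps = 0) :
    alphabetSoupBStep (caps, acc) c = (caps, acc ++ [c]) := by
  unfold alphabetSoupBStep
  rw [if_neg (by simpa [PySem.List.count_eq] using h)]

-- ---- A's consuming loop over one run of equal letters ----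
theorem pvRunLemma (c : Char) : ∀ (n : Nat) (caps acc : List Char),
    List.count (PySem.Chars.upperChar c) caps ≤ n →
    ∃ caps', (List.replicate n c).foldl alphabetSoupBStep (caps, acc) =
        (caps', acc ++ List.replicate (List.count (PySem.Chars.upperChar c) caps) (PySem.Chars.upperChar c)
          ++ List.replicate (n - List.count (PySem.Chars.upperChar c) caps) c)
      ∧ ∀ X, List.count X caps' = if X = PySem.Chars.upperChar c then 0 else List.count X caps := by
  intro n
  induction n with
  | zero =>
    intro caps acc h
    have hc0 : List.count (PySem.Chars.upperChar c) caps = 0 := Nat.le_zero.mp h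
    refine ⟨caps, by simp [hc0], ?_⟩
    intro X
    by_cases hX : X = PySem.Chars.upperChar c
    · rw [if_pos hX, hX, hc0]
    · rw [if_neg hX]
  | succ n ih =>
    intro caps acc h
    rw [List.replicate_succ, List.foldl_cons]
    by_cases h0 : List.count (PySem.Chars.upperChar c) caps = 0
    · rw [pvStep_zero h0]
      obtain ⟨caps', heq, hspec⟩ := ih caps (acc ++ [c]) (by omega)
      refine ⟨caps', ?_, hspec⟩
      rw [heq, h0]
      simp [List.replicate_succ]
    · rw [pvStep_pos h0]
      have hk : List.count (PySem.Chars.upperChar c) (caps.erase (PySem.Chars.upperChar c))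
          = List.count (PySem.Chars.upperChar c) caps - 1 := List.count_erase_self
      obtain ⟨k, hcnt⟩ : ∃ k, List.count (PySem.Chars.upperChar c) caps = k + 1 :=
        ⟨_, (Nat.succ_pred_eq_of_pos (Nat.pos_of_ne_zero h0)).symm⟩
      obtain ⟨caps', heq, hspec⟩ := ih (caps.erase (PySem.Chars.upperChar c)) (acc ++ [PySem.Chars.upperChar c])
        (by rw [hk, hcnt]; omega)
      refine ⟨caps', ?_, ?_⟩
      · rw [heq, hk, hcnt]
        simp [List.replicate_succ, Nat.succ_sub_succ]
      · intro X
        rw [hspec X]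
        by_cases hX : X = PySem.Chars.upperChar c
        · rw [if_pos hX, if_pos hX]
        · rw [if_neg hX, if_neg hX, List.count_erase_of_ne hX]

-- ---- A's loop over the whole sorted lowered list, run by run ----
theorem pvMainLemma (nf : Char → Nat) : ∀ (K : List Char) (caps acc : List Char),
    K.Nodup →
    (∀ c ∈ K, ∀ c' ∈ K, PySem.Chars.upperChar c = PySem.Chars.upperChar c' → c = c') →
    (∀ c ∈ K, List.count (PySem.Chars.upperChar c) caps ≤ nf c) →
    ((K.flatMap fun c => List.replicate (nf c) c).foldl alphabetSoupBStep (caps, acc)).2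
      = acc ++ K.flatMap (fun c =>
          List.replicate (List.count (PySem.Chars.upperChar c) caps) (PySem.Chars.upperChar c)
            ++ List.replicate (nf c - List.count (PySem.Chars.upperChar c) caps) c) := by
  intro K
  induction K with
  | nil => intro caps acc _ _ _; simp
  | cons c K ih =>
    intro caps acc hnd hinj hle
    rw [List.flatMap_cons, List.foldl_append]
    obtain ⟨caps', heq, hspec⟩ := pvRunLemma c (nf c) caps acc (hle c (List.mem_cons_self))
    rw [heq]
    obtain ⟨hcK, hndK⟩ := List.nodup_cons.mp hnd
    have hpres : ∀ c' ∈ K, List.count (PySem.Chars.upperChar c') caps'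
        = List.count (PySem.Chars.upperChar c') caps := by
      intro c' hc'
      rw [hspec]
      rw [if_neg]
      intro hEq
      have h2 := hinj c' (List.mem_cons_of_mem c hc') c List.mem_cons_self hEq
      rw [h2] at hc'
      exact hcK hc'
    rw [ih caps' _ hndK
      (fun a ha b hb => hinj a (List.mem_cons_of_mem c ha) b (List.mem_cons_of_mem c hb))
      (fun c' h => by rw [hpres c' h]; exact hle c' (List.mem_cons_of_mem c h))]
    rw [List.flatMap_congr (fun x hx => by rw [hpres x hx])]
    simp [List.append_assoc]

theorem pvCountFlat (nf : Char → Nat) : ∀ (K : List Char), K.Nodup → ∀ x,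
    List.count x (K.flatMap fun c => List.replicate (nf c) c) = if x ∈ K then nf x else 0 := by
  intro K
  induction K with
  | nil => intro _ x; simp
  | cons c K ih =>
    intro hnd x
    obtain ⟨hcK, hndK⟩ := List.nodup_cons.mp hnd
    rw [List.flatMap_cons, List.count_append, List.count_replicate, ih hndK x]
    by_cases hx : x = c
    · subst hx
      rw [if_pos (by simp), if_neg hcK, if_pos List.mem_cons_self]
      omega
    · rw [if_neg (by simpa using fun h => hx h.symm)]
      by_cases hxK : x ∈ K
      · rw [if_pos hxK, if_pos (List.mem_cons_of_mem c hxK)]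
        omega
      · rw [if_neg hxK, if_neg (by simp [hx, hxK])]

theorem pvPairwiseFlat (nf : Char → Nat) : ∀ (K : List Char), K.Pairwise (· < ·) →
    (K.flatMap fun c => List.replicate (nf c) c).Pairwise (· ≤ ·) := by
  intro K
  induction K with
  | nil => intro _; simp
  | cons c K ih =>
    intro hp
    obtain ⟨hc, hpK⟩ := List.pairwise_cons.mp hp
    rw [List.flatMap_cons, List.pairwise_append]
    refine ⟨List.pairwise_replicate.mpr (Or.inr le_rfl), ih hpK, ?_⟩
    intro a ha b hb
    rw [List.eq_of_mem_replicate ha]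
    obtain ⟨c', hc', hb'⟩ := List.mem_flatMap.mp hb
    rw [List.eq_of_mem_replicate hb']
    exact le_of_lt (hc c' hc')

-- a sorted character list is the concatenation of its runs, one per distinct character in order
theorem pvSortedRuns (l : List Char) :
    PySem.List.sorted l (fun x => x) false
      = (PySem.List.sorted (PySem.Set.ofList l) (fun x => x) false).flatMap
          (fun c => List.replicate (List.count c l) c) := by
  have hKperm : (PySem.List.sorted (PySem.Set.ofList l) (fun x => x) false).Perm (PySem.Set.ofList l) :=
    PySem.List.sorted_perm _ _ _
  have hKnd : (PySem.List.sorted (PySem.Set.ofList l) (fun x => x) false).Nodup :=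
    hKperm.nodup_iff.mpr (PySem.Set.nodup_ofList l)
  have hmemK : ∀ x, x ∈ PySem.List.sorted (PySem.Set.ofList l) (fun x => x) false ↔ x ∈ l := by
    intro x
    rw [PySem.List.mem_sorted, PySem.Set.mem_ofList]
  have hflatperm : l.Perm ((PySem.List.sorted (PySem.Set.ofList l) (fun x => x) false).flatMap
      (fun c => List.replicate (List.count c l) c)) := by
    rw [List.perm_iff_count]
    intro a
    rw [pvCountFlat _ _ hKnd a]
    by_cases ha : a ∈ PySem.List.sorted (PySem.Set.ofList l) (fun x => x) false
    · rw [if_pos ha]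
    · rw [if_neg ha]
      exact List.count_eq_zero.mpr (fun h => ha ((hmemK a).mpr h))
  refine PySem.List.eq_of_perm_of_pairwise_le_of_injective (fun x => x) Function.injective_id
    ((PySem.List.sorted_perm l _ false).trans hflatperm) ?_ ?_
  · exact PySem.List.sorted_pairwise l _
  · exact pvPairwiseFlat _ _ (PySem.List.sorted_ofList_pairwise_lt l)

theorem pvJoinNil (ps : List (List Char)) : PySem.Chars.join [] ps = ps.flatten := by
  unfold PySem.Chars.join
  induction ps with
  | nil => rfl
  | cons a t ih =>
    cases t with
    | nil => simp [List.intercalate]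
    | cons b t2 =>
      simp only [List.intercalate] at ih ⊢
      rw [List.intersperse_cons₂, List.flatten_cons, List.flatten_cons, ih]
      simp

theorem pvCntLe (s : List Char) (c : Char) (hc : c ∈ PySem.Chars.lower s) :
    List.count (PySem.Chars.upperChar c) (s.filter PySem.Chars.isupper)
      ≤ List.count c (PySem.Chars.lower s) := by
  by_cases hl : PySem.Chars.islower c = true
  · have h1 : List.count (PySem.Chars.upperChar c) (s.filter PySem.Chars.isupper)
        ≤ List.count (PySem.Chars.upperChar c) s :=
      List.Sublist.count_le _ List.filter_sublist
    have h2 : List.count (PySem.Chars.upperChar c) s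
        ≤ List.count (PySem.Chars.lowerChar (PySem.Chars.upperChar c)) (s.map PySem.Chars.lowerChar) :=
      List.count_le_count_map
    rw [pvLower_upper_of_lower hl] at h2
    unfold PySem.Chars.lower
    omega
  · have hUc : PySem.Chars.upperChar c = c := pvUpper_of_not_lower (by simpa using hl)
    have hcu : PySem.Chars.isupper c = false := by
      obtain ⟨x, _, rfl⟩ := List.mem_map.mp hc
      exact pvLower_not_upper x
    have hnm : c ∉ s.filter PySem.Chars.isupper := by
      intro h
      have h2 := (List.mem_filter.mp h).2
      rw [hcu] at h2
      exact Bool.noConfusion h2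
    rw [hUc, List.count_eq_zero.mpr hnm]
    exact Nat.zero_le _

theorem pvA_eq (string : String) : (alphabetSoupB string).toList
    = (PySem.List.sorted (PySem.Set.ofList (PySem.Chars.lower string.toList)) (fun x => x) false).flatMap
        (fun c =>
          List.replicate (List.count (PySem.Chars.upperChar c) (string.toList.filter PySem.Chars.isupper)) (PySem.Chars.upperChar c)
            ++ List.replicate (List.count c (PySem.Chars.lower string.toList)
                - List.count (PySem.Chars.upperChar c) (string.toList.filter PySem.Chars.isupper)) c) := by
  have hcap := PySem.List.foldl_append_if_eq_filter PySem.Chars.isupper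
    (PySem.List.sorted string.toList (fun x => x) false) []
  rw [List.nil_append] at hcap
  have hlow : (PySem.Str.lower string).toList = PySem.Chars.lower string.toList :=
    PySem.Str.toList_lower string
  have hcnt : ∀ X, List.count X ((PySem.List.sorted string.toList (fun x => x) false).filter PySem.Chars.isupper)
      = List.count X (string.toList.filter PySem.Chars.isupper) :=
    fun X => (List.Perm.filter _ (PySem.List.sorted_perm string.toList _ false)).count_eq X
  have hmemK : ∀ c, c ∈ PySem.List.sorted (PySem.Set.ofList (PySem.Chars.lower string.toList)) (fun x => x) false
      → c ∈ PySem.Chars.lower string.toList := by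
    intro c h
    rw [PySem.List.mem_sorted, PySem.Set.mem_ofList] at h
    exact h
  have hup : ∀ c, c ∈ PySem.Chars.lower string.toList → PySem.Chars.isupper c = false := by
    intro c h
    obtain ⟨x, _, rfl⟩ := List.mem_map.mp h
    exact pvLower_not_upper x
  have hKnd : (PySem.List.sorted (PySem.Set.ofList (PySem.Chars.lower string.toList)) (fun x => x) false).Nodup :=
    (PySem.List.sorted_perm _ _ _).nodup_iff.mpr (PySem.Set.nodup_ofList _)
  simp only [alphabetSoupB]
  rw [String.toList_ofList, hcap, hlow, pvSortedRuns (PySem.Chars.lower string.toList)]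
  rw [pvMainLemma (fun c => List.count c (PySem.Chars.lower string.toList)) _ _ []
    hKnd
    (fun a ha b hb hEq => pvUpper_inj (hup a (hmemK a ha)) (hup b (hmemK b hb)) hEq)
    (fun c hcK => by rw [hcnt]; exact pvCntLe string.toList c (hmemK c hcK))]
  rw [List.nil_append]
  exact List.flatMap_congr (fun x _ => by rw [hcnt])

theorem pvB_eq (string : String) : (alphabetSoupB_alt string).toList
    = (PySem.List.sorted (PySem.Set.ofList (PySem.Chars.lower string.toList)) (fun x => x) false).flatMap
        (fun c =>
          List.replicate (List.count (PySem.Chars.upperChar c) (string.toList.filter PySem.Chars.isupper)) (PySem.Chars.upperChar c)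
            ++ List.replicate (List.count c (PySem.Chars.lower string.toList)
                - List.count (PySem.Chars.upperChar c) (string.toList.filter PySem.Chars.isupper)) c) := by
  have hT : ∀ x, ((PySem.Str.lower string).toList.foldl
      (fun d c => d.insert c (d.getD c 0 + 1)) (PySem.Dict.empty : PySem.Dict Char Int)).getD x 0
      = (List.count x (PySem.Chars.lower string.toList) : Int) := by
    intro x
    rw [PySem.Dict.getD_foldl_insert_add_one, PySem.Dict.getD_empty, PySem.Str.toList_lower]
    simp
  have hUf : string.toList.foldl
      (fun d c => if PySem.Chars.isupper c then d.insert c (d.getD c 0 + 1) else d)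
      (PySem.Dict.empty : PySem.Dict Char Int)
      = (string.toList.filter PySem.Chars.isupper).foldl
        (fun d c => d.insert c (d.getD c 0 + 1)) PySem.Dict.empty :=
    PySem.List.foldl_if_eq_foldl_filter PySem.Chars.isupper _ _ _
  have hU : ∀ x, (string.toList.foldl
      (fun d c => if PySem.Chars.isupper c then d.insert c (d.getD c 0 + 1) else d)
      (PySem.Dict.empty : PySem.Dict Char Int)).getD x 0
      = (List.count x (string.toList.filter PySem.Chars.isupper) : Int) := by
    intro x
    rw [hUf, PySem.Dict.getD_foldl_insert_add_one, PySem.Dict.getD_empty]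
    simp
  have hkeys : ((PySem.Str.lower string).toList.foldl
      (fun d c => d.insert c (d.getD c 0 + 1)) (PySem.Dict.empty : PySem.Dict Char Int)).keys
      = PySem.Set.ofList (PySem.Chars.lower string.toList) := by
    rw [PySem.Dict.keys_foldl_insert, PySem.Dict.keys_empty, PySem.Set.update_nil_left,
      PySem.Str.toList_lower]
  simp only [alphabetSoupB_alt]
  rw [PySem.List.foldl_append_singleton_eq_map, List.nil_append, PySem.Str.toList_join,
    List.map_map, show ("" : String).toList = [] from rfl, pvJoinNil, ← List.flatMap_def, hkeys]
  refine List.flatMap_congr ?_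
  intro x _
  simp only [Function.comp]
  rw [String.toList_ofList, hT, hU, PySem.List.pyRepeat_singleton, PySem.List.pyRepeat_singleton,
    Int.toNat_natCast, Int.toNat_sub]

-- ===== VERDICT (by name: the statement is the Claim_ definition above) =====
theorem alphabetSoupB_spec : Claim_equal_alphabetSoupB := by
  intro string _
  unfold Spec_alphabetSoupB
  have h := (pvA_eq string).trans (pvB_eq string).symm
  have := congrArg String.ofList h
  rwa [String.ofList_toList, String.ofList_toList] at this
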